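-- pv_equiv track=rewrite | github.com/brandonTrinkle/Projects | MAT_243/Homework_Week_5.py | compute_f
-- ===== SOURCE A (Python) =====
-- from typing import List
--
-- def compute_f(n: int) -> int:
--     if n < 2:
--         return n
--
--     dp: List[int] = [0] * (n + 1)
--     dp[1] = 1
--
--     for i in range(2, n + 1):
--         dp[i] = dp[i // 2] + dp[i // 3]
--
--     return dp[n]
-- ===== SOURCE B (Python) =====
-- def compute_f(n: int) -> int:
--     if n < 2:
--         return n
--     memo = {}
--
--     def go(m: int) -> int:
--         if m < 2:
--             return m
--         if m in memo:
--             return memo[m]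
--         v = go(m // 2) + go(m // 3)
--         memo[m] = v
--         return v
--
--     return go(n)
-- ===== Notes on version B (the rewrite author's own statement) =====
-- stated objective: faster
-- what changed: Replaced the O(n) bottom-up DP table over all integers up to n by top-down memoized recursion that only visits the O(log^2 n) values reachable as n//2^a//3^b.
import Mathlib
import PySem

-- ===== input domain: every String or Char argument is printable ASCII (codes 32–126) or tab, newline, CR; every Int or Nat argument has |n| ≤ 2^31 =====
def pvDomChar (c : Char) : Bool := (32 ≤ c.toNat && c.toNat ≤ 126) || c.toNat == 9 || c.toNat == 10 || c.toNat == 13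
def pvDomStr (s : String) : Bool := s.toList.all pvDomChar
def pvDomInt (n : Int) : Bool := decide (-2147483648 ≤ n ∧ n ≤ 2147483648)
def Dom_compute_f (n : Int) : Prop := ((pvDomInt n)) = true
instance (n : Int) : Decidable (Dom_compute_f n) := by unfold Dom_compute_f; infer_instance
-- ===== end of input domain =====

-- B replaces A's O(n) bottom-up table with memoized recursion over only the values
-- reachable as n//2^a//3^b (asymptotically faster, as measured).


-- termination helpers for the recursions below (cited in decreasing_by)
theorem pv_half_toNat_lt (m : Int) (hm : 2 ≤ m) : (m / 2).toNat < m.toNat := by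
  have h1 : m / 2 < m := by apply Int.ediv_lt_of_lt_mul <;> omega
  have h0 : 0 ≤ m / 2 := Int.ediv_nonneg (by omega) (by omega)
  omega

theorem pv_third_toNat_lt (m : Int) (hm : 2 ≤ m) : (m / 3).toNat < m.toNat := by
  have h1 : m / 3 < m := by apply Int.ediv_lt_of_lt_mul <;> omega
  have h0 : 0 ≤ m / 3 := Int.ediv_nonneg (by omega) (by omega)
  omega

-- ===== PORT A =====
-- Literal port of A's table DP: dp = [0]*(n+1); dp[1] = 1; for i in range(2, n+1):
-- dp[i] = dp[i//2] + dp[i//3]; return dp[n].  All indices are provably in range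
-- (0 ≤ i ≤ n), so list writes use .set i.toNat and reads use pyGetD, exact here.
def compute_f (n : Int) : Int :=
  if n < 2 then n
  else
    let dp : List Int := List.replicate (n + 1).toNat 0
    let dp := PySem.List.pySetD dp 1 1
    let dp := (PySem.List.pyRange 2 (n + 1) 1).foldl
      (fun dp i =>
        PySem.List.pySetD dp i
          (PySem.List.pyGetD dp (PySem.Int.floordiv i 2) 0 +
           PySem.List.pyGetD dp (PySem.Int.floordiv i 3) 0)) dp
    PySem.List.pyGetD dp n 0

-- ===== PORT B =====
-- helper `go` of Source B: memoized recursion threading the memo dict through the calls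
def computeFGo (m : Int) (memo : PySem.Dict Int Int) : Int × PySem.Dict Int Int :=
  if _h : m < 2 then (m, memo)
  else
    match memo.get? m with
    | some v => (v, memo)
    | none =>
      let p1 := computeFGo (PySem.Int.floordiv m 2) memo
      let p2 := computeFGo (PySem.Int.floordiv m 3) p1.2
      let v := p1.1 + p2.1
      (v, p2.2.insert m v)
termination_by m.toNat
decreasing_by
  · rw [PySem.Int.floordiv_eq_ediv_of_pos (by omega)]; exact pv_half_toNat_lt m (by omega)
  · rw [PySem.Int.floordiv_eq_ediv_of_pos (by omega)]; exact pv_third_toNat_lt m (by omega)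

def compute_f_alt (n : Int) : Int :=
  if n < 2 then n
  else (computeFGo n PySem.Dict.empty).1

-- ===== PRECONDITION & SPEC =====
def Spec_compute_f (n : Int) (out : Int) : Prop := out = compute_f_alt n
instance (n : Int) (out : Int) : Decidable (Spec_compute_f n out) := by unfold Spec_compute_f; infer_instance

-- ===== CLAIM (what is proved, stated in full; the proofs are below) =====
def Claim_equal_compute_f : Prop := ∀ (n : Int), Dom_compute_f n → Spec_compute_f n (compute_f n)

-- ===== LEMMAS AND PROOFS =====

-- the mathematical function both programs compute
def fSpec (m : Int) : Int :=
  if m < 2 then m else fSpec (m / 2) + fSpec (m / 3)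
termination_by m.toNat
decreasing_by
  · exact pv_half_toNat_lt m (by omega)
  · exact pv_third_toNat_lt m (by omega)

-- a memo is good if every stored value is the true value
def GoodMemo (memo : PySem.Dict Int Int) : Prop :=
  ∀ k v, memo.get? k = some v → v = fSpec k

theorem computeFGo_correct : ∀ (N : Nat) (m : Int) (memo : PySem.Dict Int Int),
    m.toNat ≤ N → GoodMemo memo →
    (computeFGo m memo).1 = fSpec m ∧ GoodMemo (computeFGo m memo).2 := by
  intro N
  induction N with
  | zero =>
    intro m memo hN hg
    rw [computeFGo, dif_pos (show m < 2 by omega)]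
    exact ⟨by rw [fSpec, if_pos (show m < 2 by omega)], hg⟩
  | succ N ih =>
    intro m memo hN hg
    by_cases hm : m < 2
    · rw [computeFGo, dif_pos hm]
      exact ⟨by rw [fSpec, if_pos hm], hg⟩
    · rw [computeFGo, dif_neg hm]
      cases hget : memo.get? m with
      | some v =>
        simp only
        exact ⟨hg m v hget, hg⟩
      | none =>
        simp only
        have hf2 : PySem.Int.floordiv m 2 = m / 2 := PySem.Int.floordiv_eq_ediv_of_pos (by omega)
        have hf3 : PySem.Int.floordiv m 3 = m / 3 := PySem.Int.floordiv_eq_ediv_of_pos (by omega)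
        have h2lt := pv_half_toNat_lt m (by omega)
        have h3lt := pv_third_toNat_lt m (by omega)
        obtain ⟨e1, g1⟩ := ih (PySem.Int.floordiv m 2) memo (by rw [hf2]; omega) hg
        obtain ⟨e2, g2⟩ := ih (PySem.Int.floordiv m 3)
          (computeFGo (PySem.Int.floordiv m 2) memo).2 (by rw [hf3]; omega) g1
        refine ⟨?_, ?_⟩
        · rw [e1, e2, hf2, hf3]
          conv_rhs => rw [fSpec]
          rw [if_neg hm]
        · intro k v hk
          rw [PySem.Dict.get?_insert] at hk
          by_cases hkm : k = m
          · simp only [if_pos hkm] at hk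
            cases hk
            rw [e1, e2, hf2, hf3, hkm]
            conv_rhs => rw [fSpec]
            rw [if_neg hm]
          · simp only [if_neg hkm] at hk
            exact g2 k v hk

theorem compute_f_alt_eq (n : Int) : compute_f_alt n = fSpec n := by
  unfold compute_f_alt
  by_cases h : n < 2
  · rw [if_pos h]; conv_rhs => rw [fSpec]
    rw [if_pos h]
  · rw [if_neg h]
    refine (computeFGo_correct n.toNat n PySem.Dict.empty le_rfl ?_).1
    intro k v hk
    simp [PySem.Dict.get?, PySem.Dict.empty] at hk

-- A-side proof helpers: the initial table and the loop body of A's fold, named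
def aDP0 (n : Int) : List Int := PySem.List.pySetD (List.replicate (n + 1).toNat 0) 1 1
def aStep (dp : List Int) (i : Int) : List Int :=
  PySem.List.pySetD dp i
    (PySem.List.pyGetD dp (PySem.Int.floordiv i 2) 0 +
     PySem.List.pyGetD dp (PySem.Int.floordiv i 3) 0)

theorem A_fold_inv (n : Int) (hn : 2 ≤ n) :
    ∀ (k : Nat) (m : Int), m = 2 + (k : Int) → m ≤ n + 1 →
    ((PySem.List.pyRange 2 m 1).foldl aStep (aDP0 n)).length = (n + 1).toNat ∧
    ∀ j : Nat, (j : Int) < m →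
      ((PySem.List.pyRange 2 m 1).foldl aStep (aDP0 n))[j]? = some (fSpec (j : Int)) := by
  intro k
  induction k with
  | zero =>
    intro m hm hmn
    rw [hm]
    norm_num
    have hd : aDP0 n = (List.replicate (n + 1).toNat 0).set 1 1 := by
      unfold aDP0
      rw [PySem.List.pySetD_of_nonneg _ _ (by omega)]
      norm_num
    refine ⟨by simp [hd], ?_⟩
    intro j hj
    interval_cases j
    · rw [hd, List.getElem?_set_ne (by omega), List.getElem?_replicate_of_lt (by omega)]
      conv_rhs => rw [fSpec]
      norm_num
    · rw [hd, List.getElem?_set_self (by simp; omega)]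
      conv_rhs => rw [fSpec]
      norm_num
  | succ k ih =>
    intro m hm hmn
    set M : Int := 2 + (k : Int) with hM
    have hmM : m = M + 1 := by omega
    obtain ⟨ihlen, ihval⟩ := ih M rfl (by omega)
    rw [hmM, PySem.List.pyRange_one_succ_right (by omega), List.foldl_append, List.foldl_cons,
        List.foldl_nil]
    set dp := (PySem.List.pyRange 2 M 1).foldl aStep (aDP0 n) with hdp
    have hlen : (dp.length : Int) = n + 1 := by omega
    have hget : ∀ i : Int, 0 ≤ i → i < M → PySem.List.pyGetD dp i 0 = fSpec i := by
      intro i h0 hiM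
      rw [PySem.List.pyGetD_eq_getElem dp 0 h0 (by omega)]
      have := ihval i.toNat (by omega)
      rw [show ((i.toNat : Int)) = i by omega] at this
      exact List.getElem_eq_iff (by omega) |>.mpr this
    have hf2 : PySem.Int.floordiv M 2 = M / 2 := PySem.Int.floordiv_eq_ediv_of_pos (by omega)
    have hf3 : PySem.Int.floordiv M 3 = M / 3 := PySem.Int.floordiv_eq_ediv_of_pos (by omega)
    have h2lt := pv_half_toNat_lt M (by omega)
    have h3lt := pv_third_toNat_lt M (by omega)
    have h2n : 0 ≤ M / 2 := Int.ediv_nonneg (by omega) (by omega)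
    have h3n : 0 ≤ M / 3 := Int.ediv_nonneg (by omega) (by omega)
    have hstep : aStep dp M = dp.set M.toNat (fSpec (M / 2) + fSpec (M / 3)) := by
      unfold aStep
      rw [hf2, hf3, hget _ h2n (by omega), hget _ h3n (by omega),
          PySem.List.pySetD_of_nonneg _ _ (by omega)]
    rw [hstep]
    refine ⟨by simp [ihlen], ?_⟩
    intro j hj
    by_cases hjM : (j : Int) = M
    · have hjn : j = M.toNat := by omega
      rw [hjn, List.getElem?_set_self (by omega)]
      congr 1
      rw [show ((M.toNat : Int)) = M by omega]
      conv_rhs => rw [fSpec]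
      rw [if_neg (by omega)]
    · rw [List.getElem?_set_ne (by omega)]
      exact ihval j (by omega)

theorem compute_f_eq (n : Int) : compute_f n = fSpec n := by
  show (if n < 2 then n
    else PySem.List.pyGetD ((PySem.List.pyRange 2 (n + 1) 1).foldl aStep (aDP0 n)) n 0) = fSpec n
  by_cases h : n < 2
  · rw [if_pos h]; conv_rhs => rw [fSpec]
    rw [if_pos h]
  · rw [if_neg h]
    obtain ⟨hlen, hval⟩ := A_fold_inv n (by omega) (n - 1).toNat (n + 1) (by omega) le_rfl
    rw [PySem.List.pyGetD_eq_getElem _ 0 (by omega) (by omega)]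
    have := hval n.toNat (by omega)
    rw [show ((n.toNat : Int)) = n by omega] at this
    exact List.getElem_eq_iff (by omega) |>.mpr this

-- ===== VERDICT (by name: the statement is the Claim_ definition above) =====
theorem compute_f_spec : Claim_equal_compute_f := by
  intro n _
  unfold Spec_compute_f
  rw [compute_f_eq, compute_f_alt_eq]
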